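-- pv_equiv track=rewrite | github.com/weichslgartner/AdventOfCode2018_Python | src/day2.py | compare_ids
-- ===== SOURCE A (Python) =====
-- def compare_ids(id1, id2):
--     result = ""
--     diff = 0
--     for char1, char2 in zip(id1, id2):
--
--         if char1 != char2:
--             diff += 1
--         else:
--             result += char1
--         if diff > 1:
--             return ""
--     return result
-- ===== SOURCE B (Python) =====
-- def _scan_match(id1, id2, i, n):
--     # advance i while the characters at position i agree
--     while i < n and id1[i] == id2[i]:
--         i += 1
--     return i
--
--
-- def compare_ids(id1, id2):
--     n = min(len(id1), len(id2))
--     i = _scan_match(id1, id2, 0, n)          # first mismatch position (or n)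
--     if i == n:
--         return id1[:n]                       # no mismatch: whole overlap is common
--     j = _scan_match(id1, id2, i + 1, n)      # look for a second mismatch
--     if j < n:
--         return ""                            # two or more mismatches
--     return id1[:i] + id1[i + 1:n]            # exactly one: splice it out
-- ===== Notes on version B (the rewrite author's own statement) =====
-- stated objective: alternative
-- what changed: Replaces A's counting loop with two accumulators by an index-scan-and-slice algorithm: scan for the first mismatch position, scan again for a second, and build the result from slices id1[:i] + id1[i+1:n] instead of accumulating matching characters one by one.
import Mathlib
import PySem

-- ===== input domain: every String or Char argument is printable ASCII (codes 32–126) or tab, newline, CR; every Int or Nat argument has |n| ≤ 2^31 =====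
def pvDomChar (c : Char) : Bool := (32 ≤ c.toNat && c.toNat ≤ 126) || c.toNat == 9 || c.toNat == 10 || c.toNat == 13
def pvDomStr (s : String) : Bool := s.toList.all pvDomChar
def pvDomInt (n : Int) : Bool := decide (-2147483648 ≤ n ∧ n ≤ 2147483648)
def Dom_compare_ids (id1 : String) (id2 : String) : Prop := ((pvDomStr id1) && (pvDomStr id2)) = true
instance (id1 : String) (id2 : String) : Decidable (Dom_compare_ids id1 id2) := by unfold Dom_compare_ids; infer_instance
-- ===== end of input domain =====

-- B replaces A's counting loop with accumulators by an index-scan-and-slice algorithm: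
-- find the first mismatch position, look for a second one, and assemble the answer
-- from slices of id1; objective: alternative (same O(n) cost, different structure).

-- ===== PORT A =====
-- A's loop, step for step: branch on char1 != char2 (diff += 1 / result += char1),
-- then the 'if diff > 1: return ""' check.
def compareIdsGo : List (Char × Char) → List Char → Nat → String
  | [], res, _ => String.ofList res
  | (c1, c2) :: rest, res, diff =>
    if c1 ≠ c2 then
      if diff + 1 > 1 then "" else compareIdsGo rest res (diff + 1)
    else
      if diff > 1 then "" else compareIdsGo rest (res ++ [c1]) diff

def compare_ids (id1 : String) (id2 : String) : String :=
  compareIdsGo (id1.toList.zip id2.toList) [] 0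

-- ===== PORT B =====
-- _scan_match: the while loop 'while i < n and id1[i] == id2[i]: i += 1', with the
-- remaining suffixes of the two strings as char lists (n = min length, so the loop
-- stops exactly when either list runs out or the heads differ); returns the index.
def scanMatch : List Char → List Char → Nat → Nat
  | c1 :: r1, c2 :: r2, i => if c1 = c2 then scanMatch r1 r2 (i + 1) else i
  | _, _, i => i

-- compare_ids (B): slices id1[:n], id1[:i], id1[i+1:n] become take/drop; "" becomes [].
def altCore (l1 l2 : List Char) : List Char :=
  let n := min l1.length l2.length
  let i := scanMatch l1 l2 0
  if i = n then l1.take n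
  else
    let j := scanMatch (l1.drop (i + 1)) (l2.drop (i + 1)) (i + 1)
    if j < n then []
    else l1.take i ++ (l1.drop (i + 1)).take (n - (i + 1))

def compare_ids_alt (id1 : String) (id2 : String) : String :=
  String.ofList (altCore id1.toList id2.toList)

-- ===== PRECONDITION & SPEC =====
def Spec_compare_ids (id1 : String) (id2 : String) (out : String) : Prop := out = compare_ids_alt id1 id2
instance (id1 : String) (id2 : String) (out : String) : Decidable (Spec_compare_ids id1 id2 out) := by unfold Spec_compare_ids; infer_instance

-- ===== CLAIM (what is proved, stated in full; the proofs are below) =====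
def Claim_equal_compare_ids : Prop := ∀ (id1 : String) (id2 : String), Dom_compare_ids id1 id2 → Spec_compare_ids id1 id2 (compare_ids id1 id2)

-- ===== LEMMAS AND PROOFS =====

-- Invariant of A's loop: with diff ≤ 1 entering, the loop returns "" exactly when the
-- remaining mismatches push the total past 1, and otherwise the accumulated matches.
theorem compareIdsGo_eq (ps : List (Char × Char)) :
    ∀ (res : List Char) (diff : Nat), diff ≤ 1 →
      compareIdsGo ps res diff =
        if diff + (ps.filter (fun p => p.1 ≠ p.2)).length > 1 then ""
        else String.ofList (res ++ (ps.filter (fun p => p.1 = p.2)).map Prod.fst) := by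
  induction ps with
  | nil =>
    intro res diff h
    simp [compareIdsGo]
    omega
  | cons p rest ih =>
    intro res diff h
    obtain ⟨c1, c2⟩ := p
    by_cases hc : c1 = c2
    · subst hc
      rw [compareIdsGo, if_neg (by simp), if_neg (by omega : ¬ diff > 1),
        ih (res ++ [c1]) diff h]
      simp
    · rw [compareIdsGo, if_pos (by exact hc)]
      simp only [List.filter_cons, ne_eq, hc, not_false_eq_true, decide_true,
        decide_false, if_true, if_false, Bool.false_eq_true, List.length_cons]
      by_cases hd : diff = 1
      · subst hd
        try simp only [ne_eq]
        split_ifs with h1 h2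
        all_goals first | rfl | omega
      · have hd0 : diff = 0 := by omega
        subst hd0
        rw [if_neg (by omega : ¬ 0 + 1 > 1), ih res 1 (le_refl 1)]
        try simp only [ne_eq]
        split_ifs with h1 h2
        all_goals first | rfl | omega

-- scanMatch only adds to its offset: shifting the start shifts the result.
theorem scanMatch_shift (l1 : List Char) : ∀ (l2 : List Char) (i : Nat),
    scanMatch l1 l2 (i + 1) = scanMatch l1 l2 i + 1 := by
  induction l1 with
  | nil => intro l2 i; cases l2 <;> simp [scanMatch]
  | cons c1 r1 ih =>
    intro l2 i
    cases l2 with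
    | nil => simp [scanMatch]
    | cons c2 r2 =>
      by_cases hc : c1 = c2
      · simp only [scanMatch, if_pos hc]; exact ih r2 (i + 1)
      · simp [scanMatch, hc]

theorem scanMatch_offset (l1 l2 : List Char) (i : Nat) :
    scanMatch l1 l2 i = scanMatch l1 l2 0 + i := by
  induction i with
  | zero => rfl
  | succ k ih => rw [scanMatch_shift, ih]; omega

theorem scanMatch_le (l1 : List Char) : ∀ l2 : List Char,
    scanMatch l1 l2 0 ≤ min l1.length l2.length := by
  induction l1 with
  | nil => intro l2; simp [scanMatch]
  | cons c1 r1 ih =>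
    intro l2
    cases l2 with
    | nil => simp [scanMatch]
    | cons c2 r2 =>
      by_cases hc : c1 = c2
      · have := ih r2
        rw [scanMatch, if_pos hc, scanMatch_offset r1 r2 1]
        simp only [List.length_cons]
        omega
      · simp [scanMatch, hc]

-- scanMatch reaches the end iff there is no mismatching pair.
theorem scanMatch_eq_iff (l1 : List Char) : ∀ l2 : List Char,
    scanMatch l1 l2 0 = min l1.length l2.length ↔
      ((l1.zip l2).filter (fun p => p.1 ≠ p.2)) = [] := by
  induction l1 with
  | nil => intro l2; simp [scanMatch]
  | cons c1 r1 ih =>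
    intro l2
    cases l2 with
    | nil => simp [scanMatch]
    | cons c2 r2 =>
      by_cases hc : c1 = c2
      · rw [scanMatch, if_pos hc, scanMatch_offset r1 r2 1]
        simp only [List.length_cons, List.zip_cons_cons, List.filter_cons, ne_eq, hc,
          not_true_eq_false, decide_false, Bool.false_eq_true, if_false]
        constructor
        · intro h; exact (ih r2).mp (by omega)
        · intro h; have := (ih r2).mpr h; omega
      · have hle := scanMatch_le r1 r2
        simp [scanMatch, hc]

-- At a first mismatch i, the mismatch count is 1 + the count past position i+1.
theorem filter_ne_split (l1 : List Char) : ∀ l2 : List Char,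
    scanMatch l1 l2 0 < min l1.length l2.length →
      ((l1.zip l2).filter (fun p => p.1 ≠ p.2)).length =
        1 + (((l1.drop (scanMatch l1 l2 0 + 1)).zip (l2.drop (scanMatch l1 l2 0 + 1))).filter
              (fun p => p.1 ≠ p.2)).length := by
  induction l1 with
  | nil => intro l2 h; simp [scanMatch] at h
  | cons c1 r1 ih =>
    intro l2 h
    cases l2 with
    | nil => simp [scanMatch] at h
    | cons c2 r2 =>
      by_cases hc : c1 = c2
      · rw [scanMatch, if_pos hc, scanMatch_offset r1 r2 1] at h ⊢
        simp only [List.length_cons] at h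
        have h' : scanMatch r1 r2 0 < min r1.length r2.length := by omega
        simp only [List.zip_cons_cons, List.filter_cons, ne_eq, hc, not_true_eq_false,
          decide_false, Bool.false_eq_true, if_false, List.drop_succ_cons]
        exact ih r2 h'
      · rw [scanMatch, if_neg hc]
        simp [hc]
        omega

-- At a first mismatch i, the matching chars are id1's prefix plus the matches past i+1.
theorem filter_eq_split (l1 : List Char) : ∀ l2 : List Char,
    scanMatch l1 l2 0 < min l1.length l2.length →
      (((l1.zip l2).filter (fun p => p.1 = p.2)).map Prod.fst) =
        l1.take (scanMatch l1 l2 0) ++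
          (((l1.drop (scanMatch l1 l2 0 + 1)).zip (l2.drop (scanMatch l1 l2 0 + 1))).filter
              (fun p => p.1 = p.2)).map Prod.fst := by
  induction l1 with
  | nil => intro l2 h; simp [scanMatch] at h
  | cons c1 r1 ih =>
    intro l2 h
    cases l2 with
    | nil => simp [scanMatch] at h
    | cons c2 r2 =>
      by_cases hc : c1 = c2
      · rw [scanMatch, if_pos hc, scanMatch_offset r1 r2 1] at h ⊢
        simp only [List.length_cons] at h
        have h' : scanMatch r1 r2 0 < min r1.length r2.length := by omega
        simp only [List.zip_cons_cons, List.filter_cons, hc, decide_true, if_true,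
          List.map_cons, List.drop_succ_cons, List.take_succ_cons]
        rw [ih r2 h']
        simp
      · rw [scanMatch, if_neg hc]
        simp [hc]

-- The firsts of a zip are id1 truncated to the overlap.
theorem map_fst_zip_take (l1 : List Char) : ∀ l2 : List Char,
    (l1.zip l2).map Prod.fst = l1.take (min l1.length l2.length) := by
  induction l1 with
  | nil => intro l2; simp
  | cons c1 r1 ih =>
    intro l2
    cases l2 with
    | nil => simp
    | cons c2 r2 =>
      have hm : min (r1.length + 1) (r2.length + 1) = min r1.length r2.length + 1 := by omega
      simp [ih r2, hm]

-- If no pair mismatches, all pairs match, so the matched firsts are id1's overlap.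
theorem map_fst_of_no_mismatch (l1 l2 : List Char)
    (h : ((l1.zip l2).filter (fun p => p.1 ≠ p.2)) = []) :
    (((l1.zip l2).filter (fun p => p.1 = p.2)).map Prod.fst) =
      l1.take (min l1.length l2.length) := by
  have hall : ∀ p ∈ l1.zip l2, p.1 = p.2 := by
    intro p hp
    by_contra hne
    have hmem : p ∈ (l1.zip l2).filter (fun p => p.1 ≠ p.2) :=
      List.mem_filter.mpr ⟨hp, by simpa using hne⟩
    rw [h] at hmem
    exact absurd hmem (List.not_mem_nil)
  rw [List.filter_eq_self.mpr (by intro p hp; simpa using hall p hp)]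
  exact map_fst_zip_take l1 l2

-- B's core equals the canonical count/filter characterisation.
theorem altCore_eq (l1 l2 : List Char) :
    altCore l1 l2 =
      if ((l1.zip l2).filter (fun p => p.1 ≠ p.2)).length > 1 then []
      else ((l1.zip l2).filter (fun p => p.1 = p.2)).map Prod.fst := by
  unfold altCore
  set n := min l1.length l2.length with hn
  set i := scanMatch l1 l2 0 with hi
  by_cases hin : i = n
  · -- no mismatch at all
    have hne : ((l1.zip l2).filter (fun p => p.1 ≠ p.2)) = [] :=
      (scanMatch_eq_iff l1 l2).mp (by rw [← hi, ← hn]; exact hin)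
    rw [if_pos hin, if_neg (by rw [hne]; simp), map_fst_of_no_mismatch l1 l2 hne, ← hn]
  · have hlt : i < n := lt_of_le_of_ne (by rw [hi, hn]; exact scanMatch_le l1 l2) hin
    rw [if_neg hin]
    have hi1 : i + 1 ≤ l1.length := by omega
    have hi2 : i + 1 ≤ l2.length := by omega
    have hmin : min (l1.drop (i + 1)).length (l2.drop (i + 1)).length = n - (i + 1) := by
      simp [List.length_drop]; omega
    have hj : scanMatch (l1.drop (i + 1)) (l2.drop (i + 1)) (i + 1) =
        scanMatch (l1.drop (i + 1)) (l2.drop (i + 1)) 0 + (i + 1) :=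
      scanMatch_offset _ _ _
    have hsplit := filter_ne_split l1 l2 (by rw [← hi, ← hn]; exact hlt)
    rw [← hi] at hsplit
    by_cases hjn : scanMatch (l1.drop (i + 1)) (l2.drop (i + 1)) (i + 1) < n
    · -- a second mismatch exists: the dropped parts are not fully matching
      rw [if_pos hjn]
      have hd' : ((l1.drop (i + 1)).zip (l2.drop (i + 1))).filter (fun p => p.1 ≠ p.2) ≠ [] := by
        intro hnil
        have := (scanMatch_eq_iff (l1.drop (i + 1)) (l2.drop (i + 1))).mpr hnil
        rw [hmin] at this
        omega
      have : (((l1.drop (i + 1)).zip (l2.drop (i + 1))).filter (fun p => p.1 ≠ p.2)).length ≥ 1 := by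
        cases hfe : ((l1.drop (i + 1)).zip (l2.drop (i + 1))).filter (fun p => p.1 ≠ p.2) with
        | nil => exact absurd hfe hd'
        | cons a t => simp
      rw [if_pos (by omega)]
    · -- exactly one mismatch: splice it out
      rw [if_neg hjn]
      have hscan0 : scanMatch (l1.drop (i + 1)) (l2.drop (i + 1)) 0 = n - (i + 1) := by
        have hle := scanMatch_le (l1.drop (i + 1)) (l2.drop (i + 1))
        rw [hmin] at hle
        omega
      have hnil : ((l1.drop (i + 1)).zip (l2.drop (i + 1))).filter (fun p => p.1 ≠ p.2) = [] :=
        (scanMatch_eq_iff _ _).mp (by rw [hscan0, hmin])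
      rw [if_neg (by rw [hsplit, hnil]; simp)]
      rw [filter_eq_split l1 l2 (by rw [← hi, ← hn]; exact hlt), ← hi,
        map_fst_of_no_mismatch _ _ hnil, hmin]

-- ===== VERDICT (by name: the statement is the Claim_ definition above) =====
theorem compare_ids_spec : Claim_equal_compare_ids := by
  unfold Claim_equal_compare_ids
  intro id1 id2 _
  unfold Spec_compare_ids compare_ids compare_ids_alt
  rw [compareIdsGo_eq _ [] 0 (by omega), altCore_eq]
  split_ifs with h1 h2 h2 <;> first | rfl | omega
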